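-- pv_equiv track=rewrite | github.com/shubhamprabhu10/GFG-POTD | 14th June, Maximum Diamonds.py | maxDiamonds
-- ===== SOURCE A (Python) =====
-- import heapq
--
-- def maxDiamonds(A, N, K):
--     pq = []
--     for num in A:
--         heapq.heappush(pq, -num)  # Using a min-heap with negated values
--     res = 0
--     while K > 0:
--         m = -heapq.heappop(pq)
--         res += m
--         heapq.heappush(pq, -(m // 2))
--         K -= 1
--     return res
-- ===== SOURCE B (Python) =====
-- def maxDiamonds(A, N, K):
--     lst = sorted(A, reverse=True)
--     res = 0
--     for _ in range(K):
--         m = lst.pop(0)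
--         res += m
--         x = m // 2
--         # binary search in the descending list for the first index with lst[i] < x
--         lo, hi = 0, len(lst)
--         while lo < hi:
--             mid = (lo + hi) // 2
--             if lst[mid] < x:
--                 hi = mid
--             else:
--                 lo = mid + 1
--         lst.insert(lo, x)
--     return res
-- ===== Notes on version B (the rewrite author's own statement) =====
-- stated objective: alternative
-- what changed: B replaces the negated min-heap with a list sorted descending once up front; each pick pops the head and re-inserts the halved value at the position found by a hand-rolled binary search, so there is no heap and no negation trick.
import Mathlib
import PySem

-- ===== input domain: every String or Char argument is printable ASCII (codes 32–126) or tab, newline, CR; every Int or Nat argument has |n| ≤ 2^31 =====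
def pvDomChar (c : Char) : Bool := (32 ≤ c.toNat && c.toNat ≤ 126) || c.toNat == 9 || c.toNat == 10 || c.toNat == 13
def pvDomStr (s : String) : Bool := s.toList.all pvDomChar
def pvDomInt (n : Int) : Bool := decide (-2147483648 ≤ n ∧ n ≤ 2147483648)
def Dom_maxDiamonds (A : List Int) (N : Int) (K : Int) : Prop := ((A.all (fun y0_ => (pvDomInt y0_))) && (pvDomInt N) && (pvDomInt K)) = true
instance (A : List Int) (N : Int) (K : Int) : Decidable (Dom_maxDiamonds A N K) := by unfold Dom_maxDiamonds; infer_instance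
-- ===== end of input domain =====

-- ===== PORT A =====
-- B replaces A's negated min-heap by one descending sort plus binary-search re-insertion of each halved pick (objective: alternative; equivalence is about return values).
-- heapq is modeled at the value level: the heap's contents as a multiset of Ints, heappop returning the minimum value and
-- removing one occurrence of it, heappush appending. Exact for A's return value, since only Int values are compared/returned.
def loopA : Nat → List Int → Int → Option Int
  | 0, _, res => some res
  | k + 1, pq, res =>
    match PySem.List.min? pq (fun y => y) with
    | none => none          -- heappop from an empty heap: IndexError
    | some negm =>
      let m := -negm
      loopA k (pq.erase negm ++ [-(PySem.Int.floordiv m 2)]) (res + m)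

def maxDiamonds (A : List Int) (N : Int) (K : Int) : Int :=
  (loopA K.toNat (A.foldl (fun pq num => pq ++ [-num]) []) 0).getD 0

-- ===== PORT B =====
-- binary search (Source B's while lo < hi loop) in the descending list for the first index with lst[i] < x
def bsLoop (t : List Int) (x : Int) (lo hi : Int) : Int :=
  if h : lo < hi then
    let mid := PySem.Int.floordiv (lo + hi) 2
    if PySem.List.pyGetD t mid 0 < x then bsLoop t x lo mid
    else bsLoop t x (mid + 1) hi
  else lo
termination_by (hi - lo).toNat
decreasing_by
  · have := PySem.Int.floordiv_two_mid_bounds (le_of_lt h)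
    have hlt : PySem.Int.floordiv (lo + hi) 2 < hi := by
      rw [PySem.Int.floordiv_lt_iff_lt_mul (by omega)]; omega
    omega
  · have := PySem.Int.floordiv_two_mid_bounds (le_of_lt h)
    have hlt : PySem.Int.floordiv (lo + hi) 2 < hi := by
      rw [PySem.Int.floordiv_lt_iff_lt_mul (by omega)]; omega
    omega

def loopB : Nat → List Int → Int → Option Int
  | 0, _, res => some res
  | _ + 1, [], _ => none    -- lst.pop(0) on an empty list: IndexError
  | k + 1, m :: t, res =>
      let x := PySem.Int.floordiv m 2
      loopB k (PySem.List.insert t (bsLoop t x 0 t.length) x) (res + m)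

def maxDiamonds_alt (A : List Int) (N : Int) (K : Int) : Int :=
  (loopB K.toNat (PySem.List.sorted A (fun x => x) true) 0).getD 0

-- ===== PRECONDITION & SPEC =====
-- Pre_ excludes exactly the inputs on which Python A raises IndexError: an empty A with K > 0 (heappop from an empty heap).
def Pre_maxDiamonds (A : List Int) (N : Int) (K : Int) : Prop := K ≤ 0 ∨ A ≠ []
instance (A : List Int) (N : Int) (K : Int) : Decidable (Pre_maxDiamonds A N K) := by unfold Pre_maxDiamonds; infer_instance
def pvWitness_maxDiamonds : List Int × Int × Int := ([3, 1, 7], 3, 4)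

def Spec_maxDiamonds (A : List Int) (N : Int) (K : Int) (out : Int) : Prop := out = maxDiamonds_alt A N K
instance (A : List Int) (N : Int) (K : Int) (out : Int) : Decidable (Spec_maxDiamonds A N K out) := by unfold Spec_maxDiamonds; infer_instance

-- ===== CLAIM (what is proved, stated in full; the proofs are below) =====
def Claim_equal_maxDiamonds : Prop := ∀ (A : List Int) (N : Int) (K : Int), Dom_maxDiamonds A N K → Pre_maxDiamonds A N K → Spec_maxDiamonds A N K (maxDiamonds A N K)

-- ===== LEMMAS AND PROOFS =====
theorem desc_getD (t : List Int) (h : t.Pairwise (fun a b => b ≤ a)) (i j : Nat)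
    (hij : i ≤ j) (hj : j < t.length) : t.getD j 0 ≤ t.getD i 0 := by
  rcases Nat.lt_or_ge i j with hlt | hge
  · have hi : i < t.length := lt_trans hlt hj
    have := (List.pairwise_iff_getElem.mp h) i j hi hj hlt
    simpa [List.getD_eq_getElem, hi, hj] using this
  · have : i = j := le_antisymm hij hge
    subst this; exact le_refl _

theorem bsLoop_spec (t : List Int) (x : Int) (hpair : t.Pairwise (fun a b => b ≤ a)) :
    ∀ (n : Nat) (lo hi : Int), (hi - lo).toNat = n →
    0 ≤ lo → lo ≤ hi → hi ≤ (t.length : Int) →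
    (∀ i : Nat, (i : Int) < lo → i < t.length → x ≤ t.getD i 0) →
    (∀ i : Nat, hi ≤ (i : Int) → i < t.length → t.getD i 0 < x) →
    lo ≤ bsLoop t x lo hi ∧ bsLoop t x lo hi ≤ hi ∧
      (∀ i : Nat, (i : Int) < bsLoop t x lo hi → i < t.length → x ≤ t.getD i 0) ∧
      (∀ i : Nat, bsLoop t x lo hi ≤ (i : Int) → i < t.length → t.getD i 0 < x) := by
  intro n
  induction n using Nat.strong_induction_on with
  | _ n ih =>
    intro lo hi hn h0 hlh hhl hbefore hafter
    by_cases h : lo < hi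
    · have hmid := PySem.Int.floordiv_two_mid_bounds (le_of_lt h)
      set mid := PySem.Int.floordiv (lo + hi) 2 with hmiddef
      have hmlt : mid < hi := by
        rw [hmiddef, PySem.Int.floordiv_lt_iff_lt_mul (by omega)]; omega
      have hmnn : 0 ≤ mid := by omega
      have hmlen : mid < (t.length : Int) := by omega
      have hmt : mid.toNat < t.length := by omega
      have hstep : bsLoop t x lo hi =
          if PySem.List.pyGetD t mid 0 < x then bsLoop t x lo mid
          else bsLoop t x (mid + 1) hi := by
        rw [bsLoop, dif_pos h]
      have hgetd : PySem.List.pyGetD t mid 0 = t.getD mid.toNat 0 := by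
        rw [PySem.List.pyGetD_eq_getElem t 0 hmnn hmlen, List.getD_eq_getElem t 0 hmt]
      by_cases hcmp : PySem.List.pyGetD t mid 0 < x
      · -- t[mid] < x : hi := mid
        rw [hstep, if_pos hcmp]
        rw [hgetd] at hcmp
        have hafter' : ∀ i : Nat, mid ≤ (i : Int) → i < t.length → t.getD i 0 < x := by
          intro i hi1 hi2
          have : t.getD i 0 ≤ t.getD mid.toNat 0 := desc_getD t hpair mid.toNat i (by omega) hi2
          omega
        have hrec := ih ((mid - lo).toNat) (by omega) lo mid rfl h0 (by omega) (by omega)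
          hbefore hafter'
        refine ⟨hrec.1, by omega, hrec.2.2.1, ?_⟩
        intro i hi1 hi2
        rcases lt_or_ge (i : Int) mid with hc | hc
        · exact hrec.2.2.2 i hi1 hi2
        · exact hafter' i hc hi2
      · -- x ≤ t[mid] : lo := mid + 1
        rw [hstep, if_neg hcmp]
        rw [hgetd] at hcmp
        have hbefore' : ∀ i : Nat, (i : Int) < mid + 1 → i < t.length → x ≤ t.getD i 0 := by
          intro i hi1 hi2
          have : t.getD mid.toNat 0 ≤ t.getD i 0 := desc_getD t hpair i mid.toNat (by omega) hmt
          omega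
        have hrec := ih ((hi - (mid + 1)).toNat) (by omega) (mid + 1) hi rfl (by omega) (by omega)
          hhl hbefore' hafter
        exact ⟨by omega, hrec.2.1, hrec.2.2.1, hrec.2.2.2⟩
    · rw [bsLoop, dif_neg h]
      exact ⟨le_refl _, by omega, hbefore, fun i hi1 hi2 => hafter i (by omega) hi2⟩

theorem insert_bs (t : List Int) (x : Int) (hpair : t.Pairwise (fun a b => b ≤ a)) :
    (PySem.List.insert t (bsLoop t x 0 (t.length : Int)) x).Perm (x :: t) ∧
    (PySem.List.insert t (bsLoop t x 0 (t.length : Int)) x).Pairwise (fun a b => b ≤ a) := by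
  obtain ⟨h1, h2, hbef, haft⟩ := bsLoop_spec t x hpair ((t.length : Int) - 0).toNat 0 (t.length) rfl
    (le_refl 0) (by omega) (le_refl _) (by intro i hi1 hi2; omega) (by intro i hi1 hi2; omega)
  set r := bsLoop t x 0 (t.length : Int) with hr
  have hrn : r = ((r.toNat : Nat) : Int) := by omega
  have hrle : r.toNat ≤ t.length := by omega
  have hins : PySem.List.insert t r x = t.take r.toNat ++ x :: t.drop r.toNat := by
    rw [hrn]; exact PySem.List.insert_natCast t r.toNat x hrle
  constructor
  · rw [hins]
    exact (List.perm_middle).trans (by rw [List.take_append_drop])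
  · rw [hins]
    have htake : ∀ y ∈ t.take r.toNat, x ≤ y := by
      intro y hy
      rcases List.mem_iff_getElem.mp hy with ⟨i, hilen, hie⟩
      have hit : i < t.length := lt_of_lt_of_le (lt_of_lt_of_le hilen (by simp)) (le_refl _)
      have : (t.take r.toNat)[i] = t[i] := List.getElem_take
      have hxe : y = t[i] := by rw [← hie, this]
      have : x ≤ t.getD i 0 := hbef i (by simp at hilen; omega) hit
      rw [List.getD_eq_getElem t 0 hit] at this
      omega
    have hdrop : ∀ y ∈ t.drop r.toNat, y < x := by
      intro y hy
      rcases List.mem_iff_getElem.mp hy with ⟨i, hilen, hie⟩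
      have hit : r.toNat + i < t.length := by simp at hilen; omega
      have : (t.drop r.toNat)[i] = t[r.toNat + i] := by
        rw [List.getElem_drop]
      have hxe : y = t[r.toNat + i] := by rw [← hie, this]
      have := haft (r.toNat + i) (by omega) hit
      rw [List.getD_eq_getElem t 0 hit] at this
      omega
    rw [List.pairwise_append]
    refine ⟨List.Pairwise.sublist (List.take_sublist _ _) hpair, ?_, ?_⟩
    · refine List.pairwise_cons.mpr ⟨?_, List.Pairwise.sublist (List.drop_sublist _ _) hpair⟩
      intro y hy; exact le_of_lt (hdrop y hy)
    · intro a ha b hb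
      rcases List.mem_cons.mp hb with rfl | hb
      · exact htake a ha
      · exact le_trans (le_of_lt (hdrop b hb)) (htake a ha)

theorem loopA_eq_loopB (k : Nat) : ∀ (pq lst : List Int) (res : Int),
    lst.Perm (pq.map (fun z => -z)) → lst.Pairwise (fun a b => b ≤ a) →
    loopA k pq res = loopB k lst res := by
  induction k with
  | zero => intro pq lst res _ _; rfl
  | succ k ih =>
      intro pq lst res hperm hpair
      cases lst with
      | nil =>
          have hpq : pq = [] := by
            have := List.Perm.symm hperm
            simpa using (List.Perm.eq_nil this)
          subst hpq
          simp [loopA, loopB, PySem.List.min?]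
      | cons m t =>
          have hne : pq ≠ [] := by
            intro h; subst h
            exact absurd (List.Perm.eq_nil hperm) (by simp)
          rcases hm : PySem.List.min? pq (fun y => y) with _ | negm
          · rw [PySem.List.min?_eq_none_iff] at hm; exact absurd hm hne
          · have hmem : negm ∈ pq := PySem.List.min?_mem hm
            have hmin : ∀ y ∈ pq, negm ≤ y := by
              intro y hy; exact PySem.List.min?_isMin hm y hy
            have hmax : ∀ y ∈ m :: t, y ≤ m := by
              intro y hy
              rcases List.mem_cons.mp hy with rfl | hy
              · exact le_refl _
              · exact List.rel_of_pairwise_cons hpair hy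
            have hmpq : -m ∈ pq := by
              have : m ∈ pq.map (fun z => -z) := hperm.mem_iff.mp (by simp)
              rcases List.mem_map.mp this with ⟨a, ha, hae⟩
              have ha2 : a = -m := by omega
              simpa [ha2] using ha
            have h1 : negm ≤ -m := hmin _ hmpq
            have h2 : -negm ≤ m := by
              have : -negm ∈ m :: t := hperm.mem_iff.mpr (List.mem_map.mpr ⟨negm, hmem, rfl⟩)
              exact hmax _ this
            have hem : negm = -m := by omega
            subst hem
            have hpt := (List.pairwise_cons.mp hpair).2
            obtain ⟨hip, hiq⟩ := insert_bs t (PySem.Int.floordiv m 2) hpt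
            simp only [loopA, loopB, hm, neg_neg]
            apply ih _ _ _ ?_ hiq
            have h3 : (pq.erase (-m) ++ [-(PySem.Int.floordiv m 2)]).map (fun z => -z)
                = (pq.map (fun z => -z)).erase m ++ [PySem.Int.floordiv m 2] := by
              rw [List.map_append, List.map_erase neg_injective]
              simp
            rw [h3]
            have ht : t.Perm ((pq.map (fun z => -z)).erase m) := by
              have := hperm.erase m
              simpa using this
            exact (hip.trans
              ((List.perm_append_singleton (PySem.Int.floordiv m 2) t).symm)).trans
              (ht.append_right [PySem.Int.floordiv m 2])

-- ===== VERDICT (by name: the statement is the Claim_ definition above) =====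
theorem maxDiamonds_spec : Claim_equal_maxDiamonds := by
  intro A N K _ _
  unfold Spec_maxDiamonds maxDiamonds maxDiamonds_alt
  congr 1
  apply loopA_eq_loopB
  · simp only [PySem.List.foldl_append_singleton_eq_map, List.nil_append, List.map_map]
    simpa using PySem.List.sorted_perm (xs := A) (key := fun x => x) (rev := true)
  · simpa using PySem.List.sorted_pairwise_rev A (fun x => x)
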